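-- pv_equiv track=rewrite | github.com/icebeartellsnolies/leetcode | site_code/codeforces/beaut_matrix_263a.py | make_beautiful
-- ===== SOURCE A (Python) =====
-- def make_beautiful(matrix):
--     target=matrix[2][2]
--     one_index=[None,None]
--     for i in range(5):
--         for j in range(5):
--             if matrix[i][j]==1:
--                 one_index[0]=i
--                 one_index[1]=j
--
--     row_difference=2-int(one_index[0])
--     column_difference=2-int(one_index[1])
--
--     # row movement
--     count=0
--     while row_difference!=0:
--
--         if row_difference<0:
--             changed_row= int(one_index[0])-1
--             one_index[0]=(changed_row)
--             count=count+1
--         row_difference=2-int(one_index[0])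
--         if row_difference>0:
--             changed_row=int(one_index[0])+1
--             one_index[0]=(changed_row)
--             count=count+1
--         row_difference=2-int(one_index[0])
--
--     #   column movement
--
--     while column_difference!=0:
--
--         if column_difference<0:
--             changed_col= int(one_index[1])-1
--             one_index[1]=(changed_col)
--             count=count+1
--         column_difference=2-int(one_index[1])
--         if column_difference>0:
--             changed_col=int(one_index[1])+1
--             one_index[1]=(changed_col)
--             count=count+1
--         column_difference=2-int(one_index[1])
--
--     return count
-- ===== SOURCE B (Python) =====
-- def make_beautiful(matrix):
--     # simpler: closed-form |2-i|+|2-j| of the last '1' in the 5x5 window, no stepping loops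
--     pos = None
--     for i, row in enumerate(matrix[:5]):
--         for j, v in enumerate(row[:5]):
--             if v == 1:
--                 pos = (i, j)
--     i, j = pos
--     return abs(2 - i) + abs(2 - j)
-- ===== Notes on version B (the rewrite author's own statement) =====
-- stated objective: simpler
-- what changed: B keeps the single scan for the last '1' in the 5x5 window but replaces A's two one-step-at-a-time while-loops (and the unused target read) with the closed form abs(2-i)+abs(2-j).
import Mathlib
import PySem

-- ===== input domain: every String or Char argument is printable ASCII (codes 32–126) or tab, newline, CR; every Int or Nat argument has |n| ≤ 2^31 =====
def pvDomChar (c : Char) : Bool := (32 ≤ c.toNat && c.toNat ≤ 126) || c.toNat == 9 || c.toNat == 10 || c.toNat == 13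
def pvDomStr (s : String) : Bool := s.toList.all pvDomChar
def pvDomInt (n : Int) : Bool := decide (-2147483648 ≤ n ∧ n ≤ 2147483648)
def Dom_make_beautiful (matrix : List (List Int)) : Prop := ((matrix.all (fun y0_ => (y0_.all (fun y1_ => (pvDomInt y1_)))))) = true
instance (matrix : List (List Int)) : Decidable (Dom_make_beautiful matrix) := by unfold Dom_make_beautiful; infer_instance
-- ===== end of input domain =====

-- B replaces A's two step-by-step while-loops with the closed form |2-i|+|2-j| of the last '1'
-- found in the 5x5 window (objective: simpler).

-- ===== PORT A =====
-- A's while-loop (identical code for the row and the column movement): one recursive call per iteration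
def mbMove (r count : Int) : Int :=
  if 2 - r ≠ 0 then
    let r1 := if 2 - r < 0 then r - 1 else r
    let c1 := if 2 - r < 0 then count + 1 else count
    let r2 := if 2 - r1 > 0 then r1 + 1 else r1
    let c2 := if 2 - r1 > 0 then c1 + 1 else c1
    mbMove r2 c2
  else count
termination_by (2 - r).natAbs
decreasing_by split_ifs <;> omega

-- A's double for-loop recording the last (i, j) with matrix[i][j] == 1
def mbScanA (matrix : List (List Int)) : Option Int × Option Int :=
  (PySem.List.pyRange 0 5 1).foldl (fun acc i =>
    (PySem.List.pyRange 0 5 1).foldl (fun acc2 j =>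
      if (PySem.List.pyGet? matrix i).bind (fun row => PySem.List.pyGet? row j) = some 1
      then (some i, some j) else acc2) acc) (none, none)

def make_beautiful (matrix : List (List Int)) : Int :=
  let _target := (PySem.List.pyGet? matrix 2).bind (fun r => PySem.List.pyGet? r 2)  -- unused, as in A
  let oneIndex := mbScanA matrix
  -- int(one_index[0]) raises TypeError when no '1' was found: excluded by Pre_; .getD 0 is a dummy there
  let r0 := oneIndex.1.getD 0
  let c0 := oneIndex.2.getD 0
  let count := mbMove r0 0
  mbMove c0 count

-- ===== PORT B =====
-- for i, row in enumerate(matrix[:5]): for j, v in enumerate(row[:5]): if v == 1: pos = (i, j)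
def mbScanB (matrix : List (List Int)) : Option (Int × Int) :=
  (PySem.List.enumerate (PySem.List.slice matrix none (some 5)) 0).foldl (fun acc p =>
    (PySem.List.enumerate (PySem.List.slice p.2 none (some 5)) 0).foldl (fun acc2 q =>
      if q.2 = 1 then some (p.1, q.1) else acc2) acc) none

def make_beautiful_alt (matrix : List (List Int)) : Int :=
  match mbScanB matrix with
  | some (i, j) => |2 - i| + |2 - j|
  | none => 0  -- 'i, j = pos' raises TypeError here in Python: excluded by Pre_

-- ===== PRECONDITION & SPEC =====
-- Pre_ = exactly the inputs A returns on: at least 5 rows, the first 5 of length ≥ 5 (else IndexError),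
-- and some cell of the scanned 5x5 window equal to 1 (else int(None) raises TypeError).
def Pre_make_beautiful (matrix : List (List Int)) : Prop :=
  5 ≤ matrix.length ∧ (∀ row ∈ matrix.take 5, 5 ≤ row.length) ∧
    ∃ row ∈ matrix.take 5, (1 : Int) ∈ row.take 5
instance (matrix : List (List Int)) : Decidable (Pre_make_beautiful matrix) := by
  unfold Pre_make_beautiful; infer_instance

def pvWitness_make_beautiful : List (List Int) :=
  [[0,0,0,0,0],[0,0,0,0,0],[0,0,0,0,0],[0,1,0,0,0],[0,0,0,0,0]]

def Spec_make_beautiful (matrix : List (List Int)) (out : Int) : Prop := out = make_beautiful_alt matrix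
instance (matrix : List (List Int)) (out : Int) : Decidable (Spec_make_beautiful matrix out) := by
  unfold Spec_make_beautiful; infer_instance

-- ===== CLAIM (what is proved, stated in full; the proofs are below) =====
def Claim_equal_make_beautiful : Prop := ∀ (matrix : List (List Int)), Dom_make_beautiful matrix → Pre_make_beautiful matrix → Spec_make_beautiful matrix (make_beautiful matrix)

-- ===== LEMMAS AND PROOFS =====

def mbPairify (o : Option (Int × Int)) : Option Int × Option Int := (o.map Prod.fst, o.map Prod.snd)

-- A's stepping loop counts exactly the distance to 2
lemma mbMove_eq (r count : Int) : mbMove r count = count + ((2 - r).natAbs : Int) := by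
  generalize h : (2 - r).natAbs = n
  induction n using Nat.strong_induction_on generalizing r count with
  | _ n ih =>
  rw [mbMove]
  by_cases h1 : 2 - r ≠ 0
  · rw [if_pos h1]
    by_cases h2 : 2 - r < 0
    · simp only [if_pos h2, if_neg (by omega : ¬ (2 - (r - 1) > 0))]
      rw [ih ((2 - (r - 1)).natAbs) (by omega) (r - 1) (count + 1) rfl]
      omega
    · simp only [if_neg h2, if_pos (by omega : (2 - r > 0))]
      rw [ih ((2 - (r + 1)).natAbs) (by omega) (r + 1) (count + 1) rfl]
      omega
  · rw [if_neg h1]; omega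

lemma mb_step (c : Prop) [Decidable c] (i j : Int) (a : Option Int × Option Int)
    (b : Option (Int × Int)) (h : a = mbPairify b) :
    (if c then ((some i, some j) : Option Int × Option Int) else a)
      = mbPairify (if c then some (i, j) else b) := by
  split_ifs <;> simp [mbPairify, h]

lemma ex5 {α : Type} (l : List α) (h : 5 ≤ l.length) :
    ∃ a b c d e t, l = a :: b :: c :: d :: e :: t := by
  rcases l with _ | ⟨a, _ | ⟨b, _ | ⟨c, _ | ⟨d, _ | ⟨e, t⟩⟩⟩⟩⟩ <;> simp at h
  · exact ⟨a, b, c, d, e, t, rfl⟩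

-- pyGet? at the literal indices 0..4 of a list with at least five known cells
lemma mb_pg0 {α : Type} (x0 x1 x2 x3 x4 : α) (t : List α) :
    PySem.List.pyGet? (x0::x1::x2::x3::x4::t) 0 = some x0 := by
  rw [show (0:Int) = ((0:Nat):Int) from rfl, PySem.List.pyGet?_natCast]; rfl
lemma mb_pg1 {α : Type} (x0 x1 x2 x3 x4 : α) (t : List α) :
    PySem.List.pyGet? (x0::x1::x2::x3::x4::t) 1 = some x1 := by
  rw [show (1:Int) = ((1:Nat):Int) from rfl, PySem.List.pyGet?_natCast]; rfl
lemma mb_pg2 {α : Type} (x0 x1 x2 x3 x4 : α) (t : List α) :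
    PySem.List.pyGet? (x0::x1::x2::x3::x4::t) 2 = some x2 := by
  rw [show (2:Int) = ((2:Nat):Int) from rfl, PySem.List.pyGet?_natCast]; rfl
lemma mb_pg3 {α : Type} (x0 x1 x2 x3 x4 : α) (t : List α) :
    PySem.List.pyGet? (x0::x1::x2::x3::x4::t) 3 = some x3 := by
  rw [show (3:Int) = ((3:Nat):Int) from rfl, PySem.List.pyGet?_natCast]; rfl
lemma mb_pg4 {α : Type} (x0 x1 x2 x3 x4 : α) (t : List α) :
    PySem.List.pyGet? (x0::x1::x2::x3::x4::t) 4 = some x4 := by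
  rw [show (4:Int) = ((4:Nat):Int) from rfl, PySem.List.pyGet?_natCast]; rfl

-- the inner loops of the two scans, named so the outer loop can be unfolded without touching them
def mbInnA (matrix : List (List Int)) (i : Int) (acc : Option Int × Option Int) :
    Option Int × Option Int :=
  (PySem.List.pyRange 0 5 1).foldl (fun acc2 j =>
    if (PySem.List.pyGet? matrix i).bind (fun r => PySem.List.pyGet? r j) = some 1
    then (some i, some j) else acc2) acc

def mbInnB (p : Int × List Int) (acc : Option (Int × Int)) : Option (Int × Int) :=
  (PySem.List.enumerate (PySem.List.slice p.2 none (some 5)) 0).foldl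
    (fun acc2 q => if q.2 = 1 then some (p.1, q.1) else acc2) acc

lemma mbScanA_eq (m : List (List Int)) :
    mbScanA m = (PySem.List.pyRange 0 5 1).foldl (fun acc i => mbInnA m i acc) (none, none) := rfl

lemma mbScanB_eq (m : List (List Int)) :
    mbScanB m = (PySem.List.enumerate (PySem.List.slice m none (some 5)) 0).foldl
      (fun acc p => mbInnB p acc) none := rfl

-- one row of the scan: A's inner loop and B's inner loop record the same last hit
lemma mb_row_corr (matrix : List (List Int)) (i : Int) (row : List Int)
    (hrow : PySem.List.pyGet? matrix i = some row) (h5 : 5 ≤ row.length)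
    (accA : Option Int × Option Int) (accB : Option (Int × Int)) (hacc : accA = mbPairify accB) :
    mbInnA matrix i accA = mbPairify (mbInnB (i, row) accB) := by
  obtain ⟨a, b, c, d, e, t, rfl⟩ := ex5 row h5
  have hR : PySem.List.pyRange 0 5 1 = [0, 1, 2, 3, 4] := by decide
  have hs : PySem.List.slice (a::b::c::d::e::t) none (some 5) = [a,b,c,d,e] := by
    rw [PySem.List.slice_to _ (by norm_num)]; rfl
  have hb : ∀ (f : List Int → Option Int),
      (Option.some (a::b::c::d::e::t)).bind f = f (a::b::c::d::e::t) := fun _ => rfl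
  unfold mbInnA mbInnB
  simp only [hR, hs, hrow, hb, mb_pg0, mb_pg1, mb_pg2, mb_pg3, mb_pg4,
    PySem.List.enumerate_cons, PySem.List.enumerate_nil,
    List.foldl_cons, List.foldl_nil, Option.some.injEq]
  norm_num
  repeat apply mb_step
  exact hacc

-- the two scans record the same last position
lemma mbScan_corr (matrix : List (List Int)) (h5 : 5 ≤ matrix.length)
    (hr : ∀ row ∈ matrix.take 5, 5 ≤ row.length) :
    mbScanA matrix = mbPairify (mbScanB matrix) := by
  obtain ⟨r0, r1, r2, r3, r4, rest, rfl⟩ := ex5 matrix h5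
  have hR : PySem.List.pyRange 0 5 1 = [0, 1, 2, 3, 4] := by decide
  have he : PySem.List.enumerate
      (PySem.List.slice (r0::r1::r2::r3::r4::rest) none (some 5)) 0
      = [(0,r0),(1,r1),(2,r2),(3,r3),(4,r4)] := by
    rw [PySem.List.slice_to _ (by norm_num)]; rfl
  rw [mbScanA_eq, mbScanB_eq, hR, he]
  simp only [List.foldl_cons, List.foldl_nil]
  apply mb_row_corr _ 4 r4 (mb_pg4 _ _ _ _ _ _) (hr _ (by simp))
  apply mb_row_corr _ 3 r3 (mb_pg3 _ _ _ _ _ _) (hr _ (by simp))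
  apply mb_row_corr _ 2 r2 (mb_pg2 _ _ _ _ _ _) (hr _ (by simp))
  apply mb_row_corr _ 1 r1 (mb_pg1 _ _ _ _ _ _) (hr _ (by simp))
  apply mb_row_corr _ 0 r0 (mb_pg0 _ _ _ _ _ _) (hr _ (by simp))
  rfl

lemma foldl_if_none {α β : Type} (p : α → Prop) [DecidablePred p] (g : α → β)
    (l : List α) (acc : Option β) :
    (l.foldl (fun a x => if p x then some (g x) else a) acc = none) ↔
      (acc = none ∧ ∀ x ∈ l, ¬ p x) := by
  induction l generalizing acc with
  | nil => simp
  | cons x xs ih =>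
    simp only [List.foldl_cons, ih, List.mem_cons]
    by_cases hp : p x <;> simp [hp]

lemma foldl_none_pres {α β : Type} (f : Option β → α → Option β) (Q : α → Prop)
    (hf : ∀ acc x, f acc x = none ↔ acc = none ∧ Q x)
    (l : List α) (acc : Option β) :
    l.foldl f acc = none ↔ acc = none ∧ ∀ x ∈ l, Q x := by
  induction l generalizing acc with
  | nil => simp
  | cons x xs ih =>
    simp only [List.foldl_cons, ih, hf, List.mem_cons]
    constructor
    · rintro ⟨⟨ha, hq⟩, hall⟩
      exact ⟨ha, fun y hy => hy.elim (fun h => h ▸ hq) (hall y)⟩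
    · rintro ⟨ha, hall⟩
      exact ⟨⟨ha, hall x (Or.inl rfl)⟩, fun y hy => hall y (Or.inr hy)⟩

lemma mem_enumerate_of_mem {α : Type} {x : α} {l : List α} (h : x ∈ l) (s : Int) :
    ∃ i, (i, x) ∈ PySem.List.enumerate l s := by
  induction l generalizing s with
  | nil => simp at h
  | cons y ys ih =>
    rcases List.mem_cons.mp h with rfl | h'
    · exact ⟨s, by simp [PySem.List.enumerate_cons]⟩
    · obtain ⟨i, hi⟩ := ih h' (s + 1)
      exact ⟨i, by simp [PySem.List.enumerate_cons, hi]⟩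

-- with a '1' in the window, B's scan finds a position
lemma mbScanB_some (matrix : List (List Int))
    (hex : ∃ row ∈ matrix.take 5, (1 : Int) ∈ row.take 5) :
    mbScanB matrix ≠ none := by
  obtain ⟨row, hrow, hone⟩ := hex
  unfold mbScanB
  intro hnone
  rw [foldl_none_pres _ (fun p : Int × List Int => ∀ q ∈ PySem.List.enumerate (PySem.List.slice p.2 none (some 5)) 0, ¬ q.2 = 1)
      (fun acc p => foldl_if_none (fun q : Int × Int => q.2 = 1) (fun q : Int × Int => (p.1, q.1)) _ acc)] at hnone
  obtain ⟨-, hall⟩ := hnone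
  have hsl : PySem.List.slice matrix none (some 5) = matrix.take 5 := by
    rw [PySem.List.slice_to matrix (by norm_num)]; rfl
  obtain ⟨i, hi⟩ := mem_enumerate_of_mem (hsl ▸ hrow) 0
  have hsl2 : PySem.List.slice row none (some 5) = row.take 5 := by
    rw [PySem.List.slice_to row (by norm_num)]; rfl
  obtain ⟨j, hj⟩ := mem_enumerate_of_mem hone 0
  exact hall (i, row) hi (j, 1) (by rw [hsl2]; exact hj) rfl

-- ===== VERDICT (by name: the statement is the Claim_ definition above) =====
theorem make_beautiful_spec : Claim_equal_make_beautiful := by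
  intro matrix _ hpre
  obtain ⟨h5, hr, hex⟩ := hpre
  unfold Spec_make_beautiful make_beautiful make_beautiful_alt
  rw [mbScan_corr matrix h5 hr]
  rcases ho : mbScanB matrix with _ | ⟨i, j⟩
  · exact absurd ho (mbScanB_some matrix hex)
  · simp only [mbPairify, Option.map_some, Option.getD_some]
    rw [mbMove_eq, mbMove_eq, Int.abs_eq_natAbs, Int.abs_eq_natAbs]
    omega
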